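-- pv_equiv track=rewrite | github.com/aimat-lab/AutoSlurm | auto_slurm/aslurmx.py | extract_commands_from_args
-- ===== SOURCE A (Python) =====
-- def extract_commands_from_args(args: list[str]) -> list[str]:
--     """
--     Extracts individual command strings from a list of arguments, where each command is prefixed by the keyword "cmd".
--     This method scans through the provided list of arguments (`args`), searching for occurrences of the string "cmd".
--     For each "cmd" found, it collects all subsequent arguments up to the next "cmd" or the end of the list, and joins them
--     into a single command string separated by spaces. Each such command string is added to the returned list.
--
--     Args:
--         args (list[str]): A list of strings representing arguments, where each command is introduced by the keyword "cmd".
--                           For example: ["cmd", "echo", "hello", "cmd", "ls", "-l"]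
--     Returns:
--         list[str]: A list of command strings, each assembled from the arguments following a "cmd" keyword up to the next "cmd"
--                    or the end of the list. Empty commands (i.e., "cmd" not followed by any arguments) are ignored.
--     Example:
--         >>> extract_commands_from_args(["cmd", "echo", "hello", "cmd", "ls", "-l"])
--         ['echo hello', 'ls -l']
--     Notes:
--         - If "cmd" appears consecutively (e.g., ["cmd", "cmd", "ls"]), empty commands are ignored.
--         - Arguments before the first "cmd" are ignored.
--         - The method does not validate the content of the commands, only their extraction based on the "cmd" delimiter.
--     """
--     # In this list we will store all the individual assembled commands that are found
--     # in the argument list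
--     commands: list[str] = []
--
--     # We iterate through the arguments, as soon as we find a "cmd" argument we start collecting
--     # all the following arguments until we find the next "cmd" argument or reach the end of the list.
--     # We combine all the arguments in between into a single command string by inserting whitespaces.
--     i = 0
--     while i < len(args):
--         if args[i] == "cmd":
--             j = i + 1
--             while j < len(args) and args[j] != "cmd":
--                 j += 1
--             command = " ".join(args[i+1:j])
--             if command.strip():
--                 commands.append(command)
--             i = j
--         else:
--             i += 1
--
--     return commands
-- ===== SOURCE B (Python) =====
-- def extract_commands_from_args(args: list[str]) -> list[str]:
--     # Split the argument list into groups at every "cmd" delimiter (like str.split),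
--     # then join each group after the first and keep the non-blank ones.
--     done: list[list[str]] = []
--     cur: list[str] = []
--     for x in args:
--         if x == "cmd":
--             done.append(cur)
--             cur = []
--         else:
--             cur.append(x)
--     done.append(cur)
--
--     commands: list[str] = []
--     for group in done[1:]:
--         command = " ".join(group)
--         if command.strip():
--             commands.append(command)
--     return commands
-- ===== Notes on version B (the rewrite author's own statement) =====
-- stated objective: simpler
-- what changed: Replaces A's two-pointer nested index scan with a split-then-process decomposition: one pass partitions the list at every 'cmd' delimiter into groups, then the groups after the first are joined and filtered.
import Mathlib
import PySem

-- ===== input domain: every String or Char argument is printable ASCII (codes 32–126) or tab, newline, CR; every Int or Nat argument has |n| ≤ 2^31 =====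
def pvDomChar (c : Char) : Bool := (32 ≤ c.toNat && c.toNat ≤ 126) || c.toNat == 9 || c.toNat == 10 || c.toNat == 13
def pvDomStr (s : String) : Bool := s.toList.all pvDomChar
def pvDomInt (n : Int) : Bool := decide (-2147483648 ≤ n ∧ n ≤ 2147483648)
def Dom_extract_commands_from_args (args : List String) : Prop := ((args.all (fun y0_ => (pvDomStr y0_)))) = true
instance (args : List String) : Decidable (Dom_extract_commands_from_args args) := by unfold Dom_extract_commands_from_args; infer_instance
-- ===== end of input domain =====

-- B replaces A's two-pointer nested scan by a split-at-delimiter pass followed by a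
-- join-and-filter pass over the groups (simpler decomposition, same O(n) cost).

-- ===== PORT A =====
-- A's outer while loop over i, carrying the accumulated `commands`; the inner while loop
-- that advances j to the next "cmd" is the takeWhile/dropWhile split of the suffix at i.
def pvGoA (commands : List String) : List String → List String
  | [] => commands
  | x :: rest =>
    if x = "cmd" then
      let seg := rest.takeWhile (fun a => a ≠ "cmd")       -- args[i+1:j]
      let command := PySem.Str.join " " seg
      let commands' := if PySem.Str.strip command ≠ "" then commands ++ [command] else commands
      pvGoA commands' (rest.dropWhile (fun a => a ≠ "cmd"))  -- i = j
    else
      pvGoA commands rest                                   -- i += 1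
termination_by xs => xs.length
decreasing_by
  · simp only [List.length_cons]
    exact Nat.lt_succ_of_le (List.length_dropWhile_le _ _)
  · simp

def extract_commands_from_args (args : List String) : List String := pvGoA [] args

-- ===== PORT B =====
-- Source B first pass: split args into groups at every "cmd" (state = (done, cur))
def pvSplitStep (s : List (List String) × List String) (x : String) : List (List String) × List String :=
  if x = "cmd" then (s.1 ++ [s.2], []) else (s.1, s.2 ++ [x])

-- Source B second pass, loop body: join a group and keep it if non-blank
def pvJoinStep (commands : List String) (group : List String) : List String :=
  let command := PySem.Str.join " " group
  if PySem.Str.strip command ≠ "" then commands ++ [command] else commands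

def extract_commands_from_args_alt (args : List String) : List String :=
  let s := args.foldl pvSplitStep ([], [])
  let groups := s.1 ++ [s.2]
  (groups.drop 1).foldl pvJoinStep []

-- ===== PRECONDITION & SPEC =====
def Spec_extract_commands_from_args (args : List String) (out : List String) : Prop := out = extract_commands_from_args_alt args
instance (args : List String) (out : List String) : Decidable (Spec_extract_commands_from_args args out) := by unfold Spec_extract_commands_from_args; infer_instance

-- ===== CLAIM (what is proved, stated in full; the proofs are below) =====
def Claim_equal_extract_commands_from_args : Prop := ∀ (args : List String), Dom_extract_commands_from_args args → Spec_extract_commands_from_args args (extract_commands_from_args args)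

-- ===== LEMMAS AND PROOFS =====

-- the groups of Source B's first pass, as a structural recursion
def pvGsplit : List String → List (List String)
  | [] => [[]]
  | x :: t => if x = "cmd" then [] :: pvGsplit t else (pvGsplit t).modifyHead (fun g => x :: g)

theorem pvGsplit_ne_nil (t : List String) : pvGsplit t ≠ [] := by
  induction t with
  | nil => simp [pvGsplit]
  | cons x t ih =>
    by_cases h : x = "cmd"
    · simp [pvGsplit, h]
    · simp only [pvGsplit, if_neg h]
      cases hg : pvGsplit t with
      | nil => exact absurd hg ih
      | cons g gs => simp [List.modifyHead]

-- characterization of pvGsplit by takeWhile/dropWhile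
theorem pvGsplit_eq (t : List String) :
    pvGsplit t = t.takeWhile (fun a => a ≠ "cmd") ::
      (pvGsplit (t.dropWhile (fun a => a ≠ "cmd"))).drop 1 := by
  induction t with
  | nil => simp [pvGsplit]
  | cons x t ih =>
    by_cases h : x = "cmd"
    · subst h
      simp [pvGsplit]
    · simp only [pvGsplit, if_neg h, List.takeWhile_cons, List.dropWhile_cons, ih]
      simp [h, List.modifyHead]

-- the foldl of pvSplitStep computes pvGsplit
theorem pvFoldl_split (xs : List String) : ∀ (done : List (List String)) (cur : List String),
    (xs.foldl pvSplitStep (done, cur)).1 ++ [(xs.foldl pvSplitStep (done, cur)).2] =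
      done ++ (pvGsplit xs).modifyHead (fun g => cur ++ g) := by
  induction xs with
  | nil => intro done cur; simp [pvGsplit, List.modifyHead]
  | cons x t ih =>
    intro done cur
    by_cases h : x = "cmd"
    · subst h
      simp only [List.foldl_cons, pvSplitStep, ih, pvGsplit, List.modifyHead]
      cases hg : pvGsplit t with
      | nil => exact absurd hg (pvGsplit_ne_nil t)
      | cons g gs => simp
    · simp only [List.foldl_cons, pvSplitStep, if_neg h, ih, pvGsplit]
      cases hg : pvGsplit t with
      | nil => exact absurd hg (pvGsplit_ne_nil t)
      | cons g gs => simp [List.modifyHead]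

-- A's scan equals B's second pass over the group tail
theorem pvGoA_aux : ∀ (n : Nat) (xs : List String), xs.length ≤ n → ∀ (acc : List String),
    pvGoA acc xs = ((pvGsplit xs).drop 1).foldl pvJoinStep acc := by
  intro n
  induction n with
  | zero =>
    intro xs hx acc
    cases xs with
    | nil => simp [pvGoA, pvGsplit]
    | cons x rest => simp at hx
  | succ n ihn =>
    intro xs hx acc
    cases xs with
    | nil => simp [pvGoA, pvGsplit]
    | cons x rest =>
      by_cases h : x = "cmd"
      · subst h
        have hlen : (rest.dropWhile (fun a => a ≠ "cmd")).length ≤ n := by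
          have := List.length_dropWhile_le (fun a => (a ≠ "cmd" : Bool)) rest
          simp only [List.length_cons] at hx
          omega
        simp only [pvGoA, reduceIte]
        rw [ihn _ hlen]
        have hg : pvGsplit ("cmd" :: rest) = [] :: pvGsplit rest := by simp [pvGsplit]
        rw [hg, show (([] : List String) :: pvGsplit rest).drop 1 = pvGsplit rest from rfl,
          pvGsplit_eq rest]
        simp [pvJoinStep]
      · have hlen : rest.length ≤ n := by
          simp only [List.length_cons] at hx
          omega
        simp only [pvGoA, if_neg h]
        rw [ihn _ hlen]
        have hm : pvGsplit (x :: rest) = (pvGsplit rest).modifyHead (fun g => x :: g) := by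
          simp [pvGsplit, h]
        rw [hm]
        cases hg : pvGsplit rest with
        | nil => exact absurd hg (pvGsplit_ne_nil rest)
        | cons g gs => simp [List.modifyHead]

theorem pvGoA_eq_foldl (xs : List String) (acc : List String) :
    pvGoA acc xs = ((pvGsplit xs).drop 1).foldl pvJoinStep acc :=
  pvGoA_aux xs.length xs le_rfl acc

-- ===== VERDICT (by name: the statement is the Claim_ definition above) =====
theorem extract_commands_from_args_spec : Claim_equal_extract_commands_from_args := by
  intro args _
  unfold Spec_extract_commands_from_args extract_commands_from_args extract_commands_from_args_alt
  rw [pvGoA_eq_foldl]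
  show List.foldl pvJoinStep [] ((pvGsplit args).drop 1) =
    List.foldl pvJoinStep [] (((args.foldl pvSplitStep ([], [])).1 ++
      [(args.foldl pvSplitStep ([], [])).2]).drop 1)
  rw [pvFoldl_split args [] []]
  cases hg : pvGsplit args with
  | nil => exact absurd hg (pvGsplit_ne_nil args)
  | cons g gs => simp [List.modifyHead]
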